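-- pv_equiv track=rewrite | github.com/pabloramesc/advent-of-code-2025 | day6_part1.py | worksheet_to_problems
-- ===== SOURCE A (Python) =====
-- ProblemType = tuple[str, list[int]]  # operator code + list of numbers
--
-- def worksheet_to_problems(txt: str):
--     lines = [line.split() for line in txt.splitlines()]
--
--     nprobs = len(lines[0])
--     for line in lines:
--         if len(line) != nprobs:
--             raise ValueError("All lines must have same number of elements.")
--
--     problems: list[ProblemType] = []
--     for k in range(nprobs):
--         numbers = [int(line[k]) for line in lines[:-1]]
--         operator = lines[-1][k]
--         problem = (operator, numbers)
--         problems.append(problem)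
--
--     return problems
-- ===== SOURCE B (Python) =====
-- def worksheet_to_problems(txt: str):
--     lines = [line.split() for line in txt.splitlines()]
--
--     nprobs = len(lines[0])
--     for line in lines:
--         if len(line) != nprobs:
--             raise ValueError("All lines must have same number of elements.")
--
--     # single row-major pass: fold the number rows into per-column accumulators,
--     # parsing each token as it is encountered; the last row supplies the operators
--     accs = [[] for _ in range(nprobs)]
--     for row in lines[:-1]:
--         accs = [nums + [int(tok)] for nums, tok in zip(accs, row)]
--     return [(op, nums) for op, nums in zip(lines[-1], accs)]
-- ===== Notes on version B (the rewrite author's own statement) =====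
-- stated objective: alternative
-- what changed: A loops over column indices and re-scans every row per column; B makes a single row-major pass, folding each number row into per-column accumulator lists (zipWith-style extension) and finally pairing the last row's operators with the accumulators, so no index-based column extraction happens at all.
import Mathlib
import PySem

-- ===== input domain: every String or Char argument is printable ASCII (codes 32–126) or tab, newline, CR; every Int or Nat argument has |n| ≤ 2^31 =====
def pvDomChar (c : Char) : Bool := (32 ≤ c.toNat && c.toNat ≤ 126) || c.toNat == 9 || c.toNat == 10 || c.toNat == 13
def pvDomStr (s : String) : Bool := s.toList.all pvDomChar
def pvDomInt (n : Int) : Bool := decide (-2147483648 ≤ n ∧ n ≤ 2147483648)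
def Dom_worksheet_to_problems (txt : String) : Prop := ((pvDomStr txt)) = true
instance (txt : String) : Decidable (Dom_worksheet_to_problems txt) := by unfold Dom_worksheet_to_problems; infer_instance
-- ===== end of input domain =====

-- B replaces A's column-index loop (which re-scans every row per column) by a single
-- row-major pass folding each number row into per-column accumulator lists; same cost.

-- lines = [line.split() for line in txt.splitlines()]  (first statement of both A and B)
def pvLines (txt : String) : List (List String) :=
  (PySem.Str.splitlines txt).map PySem.Str.split₀

-- ===== PORT A =====
-- port of A: k runs over range(nprobs); line[k] via pyGetD (in range under Pre_),
-- lines[:-1] via slice, lines[-1] via pyGetD at -1; the raising width-check loop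
-- is excluded by Pre_ (it produces no value).
def worksheet_to_problems (txt : String) : List (String × List Int) :=
  (PySem.List.pyRange 0 (((pvLines txt).headD []).length : Int) 1).map (fun k =>
    (PySem.List.pyGetD (PySem.List.pyGetD (pvLines txt) (-1) []) k "",
     (PySem.List.slice (pvLines txt) none (some (-1))).map
       (fun line => (PySem.Int.ofStr? (PySem.List.pyGetD line k "")).getD 0)))

-- ===== PORT B =====
-- one Python row folded into the accumulators: accs = [nums + [int(tok)] for nums, tok in zip(accs, row)]
def pvStep (accs : List (List Int)) (row : List String) : List (List Int) :=
  List.zipWith (fun nums tok => nums ++ [(PySem.Int.ofStr? tok).getD 0]) accs row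

-- port of B: the raising width-validation loop of Source B produces no value and its raising
-- inputs are excluded by Pre_, so the port goes straight to the accumulator fold.
def worksheet_to_problems_alt (txt : String) : List (String × List Int) :=
  (PySem.List.pyGetD (pvLines txt) (-1) []).zip
    ((PySem.List.slice (pvLines txt) none (some (-1))).foldl pvStep
      ((List.range ((pvLines txt).headD []).length).map (fun _ => ([] : List Int))))

-- ===== PRECONDITION & SPEC =====
-- Pre_ excludes exactly the inputs where A raises: empty txt (IndexError on lines[0]),
-- ragged rows (ValueError), and a non-integer token in a non-last row (ValueError in int()).
def Pre_worksheet_to_problems (txt : String) : Prop :=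
  pvLines txt ≠ [] ∧
    (∀ l ∈ pvLines txt, l.length = ((pvLines txt).headD []).length) ∧
    (∀ l ∈ (pvLines txt).dropLast, ∀ t ∈ l, (PySem.Int.ofStr? t).isSome = true)
instance (txt : String) : Decidable (Pre_worksheet_to_problems txt) := by
  unfold Pre_worksheet_to_problems; infer_instance

def pvWitness_worksheet_to_problems : String := "1 2\n3 4\n+ *"

def Spec_worksheet_to_problems (txt : String) (out : List (String × List Int)) : Prop := out = worksheet_to_problems_alt txt
instance (txt : String) (out : List (String × List Int)) : Decidable (Spec_worksheet_to_problems txt out) := by unfold Spec_worksheet_to_problems; infer_instance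

-- ===== CLAIM (what is proved, stated in full; the proofs are below) =====
def Claim_equal_worksheet_to_problems : Prop := ∀ (txt : String), Dom_worksheet_to_problems txt → Pre_worksheet_to_problems txt → Spec_worksheet_to_problems txt (worksheet_to_problems txt)

-- ===== LEMMAS AND PROOFS =====

-- one pvStep on a range-indexed accumulator family appends the row's parsed tokens pointwise
theorem pvStep_map_range (n : ℕ) (g : ℕ → List Int) (r : List String) (hr : r.length = n) :
    pvStep ((List.range n).map g) r
      = (List.range n).map (fun k => g k ++ [(PySem.Int.ofStr? (r.getD k "")).getD 0]) := by
  apply List.ext_getElem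
  · simp [pvStep, hr]
  · intro i h1 h2
    have hi : i < n := by simpa using h2
    have hir : i < r.length := by omega
    simp [pvStep, List.getD_eq_getElem?_getD, List.getElem?_eq_getElem hir]

-- invariant of the row fold: after folding rows R (all of width n), accumulator k holds column k
theorem pv_fold_cols (n : ℕ) (R : List (List String)) (hw : ∀ r ∈ R, r.length = n) :
    R.foldl pvStep ((List.range n).map (fun _ => ([] : List Int)))
      = (List.range n).map (fun k => R.map (fun r => (PySem.Int.ofStr? (r.getD k "")).getD 0)) := by
  induction R using List.reverseRecOn with
  | nil => simp
  | append_singleton R r ih =>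
    have hR : ∀ l ∈ R, l.length = n := fun l hl => hw l (by simp [hl])
    have hr : r.length = n := hw r (by simp)
    rw [List.foldl_append, List.foldl_cons, List.foldl_nil, ih hR,
      pvStep_map_range n _ r hr]
    refine List.map_congr_left (fun k _ => ?_)
    simp

-- zipping two length-n lists is the range-indexed list of pairs
theorem pv_zip_map_range (n : ℕ) (xs : List String) (g : ℕ → List Int) (hx : xs.length = n) :
    xs.zip ((List.range n).map g)
      = (List.range n).map (fun k => (xs.getD k "", g k)) := by
  apply List.ext_getElem
  · simp [hx]
  · intro i h1 h2
    have hi : i < n := by simpa using h2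
    have hix : i < xs.length := by omega
    simp [List.getD_eq_getElem?_getD, List.getElem?_eq_getElem hix]

theorem pv_main (txt : String) (h : Pre_worksheet_to_problems txt) :
    worksheet_to_problems txt = worksheet_to_problems_alt txt := by
  obtain ⟨hne, hw, -⟩ := h
  set L := pvLines txt with hL
  set n := (L.headD []).length with hn
  have hrows : ∀ r ∈ L.dropLast, r.length = n :=
    fun r hr => hw r ((List.dropLast_sublist L).subset hr)
  have hlastmem : L.getLast hne ∈ L := List.getLast_mem hne
  have hlast : (L.getLast hne).length = n := hw _ hlastmem
  unfold worksheet_to_problems worksheet_to_problems_alt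
  rw [← hL, ← hn]
  rw [PySem.List.slice_to_neg_one, PySem.List.pyGetD_neg_one _ _ hne,
    pv_fold_cols n L.dropLast hrows,
    pv_zip_map_range n _ _ hlast,
    PySem.List.pyRange_zero_natCast, List.map_map]
  refine List.map_congr_left (fun k _ => ?_)
  simp only [Function.comp]
  refine Prod.ext ?_ ?_
  · show PySem.List.pyGetD (L.getLast hne) (k : Int) "" = (L.getLast hne).getD k ""
    rw [PySem.List.pyGetD_natCast]
  · show (L.dropLast.map
        (fun line => (PySem.Int.ofStr? (PySem.List.pyGetD line (k : Int) "")).getD 0))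
      = L.dropLast.map (fun r => (PySem.Int.ofStr? (r.getD k "")).getD 0)
    refine List.map_congr_left (fun l _ => ?_)
    rw [PySem.List.pyGetD_natCast]

-- ===== VERDICT (by name: the statement is the Claim_ definition above) =====
theorem worksheet_to_problems_spec : Claim_equal_worksheet_to_problems := by
  intro txt _ hpre
  unfold Spec_worksheet_to_problems
  exact pv_main txt hpre
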